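-- pv_equiv track=rewrite | github.com/wirc-sjsu/firebench | src/firebench/standardize/tools.py | merge_authors
-- ===== SOURCE A (Python) =====
-- def merge_authors(authors_1: str, authors_2: str):
--     list_authors_1 = [a.strip() for a in authors_1.split(";") if a.strip()]
--     list_authors_2 = [a.strip() for a in authors_2.split(";") if a.strip()]
--     n1, n2 = len(list_authors_1), len(list_authors_2)
--     merged_authors: list[str] = []
--     seen = set()
--
--     max_len = max(n1, n2)
--     for i in range(max_len):
--         if i < n1:
--             a1 = list_authors_1[i]
--             if a1 and a1 not in seen:
--                 merged_authors.append(a1)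
--                 seen.add(a1)
--         if i < n2:
--             a2 = list_authors_2[i]
--             if a2 and a2 not in seen:
--                 merged_authors.append(a2)
--                 seen.add(a2)
--
--     if not merged_authors:
--         return ""
--
--     return ";".join(merged_authors) + ";"
-- ===== SOURCE B (Python) =====
-- def merge_authors(authors_1: str, authors_2: str):
--     list_authors_1 = [a.strip() for a in authors_1.split(";") if a.strip()]
--     list_authors_2 = [a.strip() for a in authors_2.split(";") if a.strip()]
--     # Rank each author by its earliest slot in the interleaved order:
--     # slot 2*i for list 1, slot 2*i + 1 for list 2; keep the minimum slot.
--     rank = {}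
--     for i, a in enumerate(list_authors_1):
--         r = 2 * i
--         if rank.get(a, r + 1) > r:
--             rank[a] = r
--     for i, a in enumerate(list_authors_2):
--         r = 2 * i + 1
--         if rank.get(a, r + 1) > r:
--             rank[a] = r
--     # Sorting the distinct authors by that minimal slot yields the merged order.
--     merged = sorted(rank, key=rank.get)
--     return ";".join(merged) + ";" if merged else ""
-- ===== Notes on version B (the rewrite author's own statement) =====
-- stated objective: alternative
-- what changed: A's single index loop that interleaves the two lists while deduplicating with a seen-set is replaced by a rank-and-sort algorithm: a dict maps each author to its minimal slot in the interleaved order (2*i for list 1, 2*i+1 for list 2) and the distinct authors are then sorted by that rank.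
import Mathlib
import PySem

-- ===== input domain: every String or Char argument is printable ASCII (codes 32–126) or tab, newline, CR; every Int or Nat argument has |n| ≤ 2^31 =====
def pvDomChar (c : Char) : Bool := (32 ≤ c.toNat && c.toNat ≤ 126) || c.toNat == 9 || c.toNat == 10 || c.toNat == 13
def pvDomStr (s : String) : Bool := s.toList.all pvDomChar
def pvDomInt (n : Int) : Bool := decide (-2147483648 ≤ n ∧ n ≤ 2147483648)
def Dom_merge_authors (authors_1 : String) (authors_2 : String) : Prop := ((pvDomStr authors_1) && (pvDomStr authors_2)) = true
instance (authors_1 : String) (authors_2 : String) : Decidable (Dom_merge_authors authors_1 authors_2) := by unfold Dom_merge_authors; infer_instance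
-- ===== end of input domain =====

-- B replaces A's single interleave-and-dedup index loop (seen-set, in-order appends) by a
-- rank-and-sort algorithm: a dict maps each author to its minimal slot in the interleaved
-- order (2*i for list 1, 2*i+1 for list 2), and sorting the distinct authors by that rank
-- yields the merged order; alternative algorithm (O(k log k) sort), same observable result.

-- ===== PORT A =====
-- shared parsing helper: [a.strip() for a in s.split(";") if a.strip()]  (identical in A and B)
def pvParse (s : String) : List String :=
  (((PySem.Str.split? s ";").getD []).filter (fun a => PySem.Str.strip a != "")).map
    (fun a => PySem.Str.strip a)

-- the loop body of A's 'for i in range(max_len)' (state = (merged_authors, seen))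
def pvBodyA (l1 l2 : List String) (st : List String × PySem.Set String) (i : Int) :
    List String × PySem.Set String :=
  let st :=
    if i < (l1.length : Int) then
      let a1 := PySem.List.pyGetD l1 i ""
      if a1 != "" && !(PySem.Set.contains st.2 a1) then (st.1 ++ [a1], PySem.Set.add st.2 a1)
      else st
    else st
  if i < (l2.length : Int) then
    let a2 := PySem.List.pyGetD l2 i ""
    if a2 != "" && !(PySem.Set.contains st.2 a2) then (st.1 ++ [a2], PySem.Set.add st.2 a2)
    else st
  else st

def merge_authors (authors_1 : String) (authors_2 : String) : String :=
  let l1 := pvParse authors_1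
  let l2 := pvParse authors_2
  let maxLen := max l1.length l2.length
  let st := (PySem.List.pyRange 0 (maxLen : Int) 1).foldl (pvBodyA l1 l2) ([], PySem.Set.empty)
  if st.1.isEmpty then "" else PySem.Str.join ";" st.1 ++ ";"

-- ===== PORT B =====
-- Source B's two rank-building loops ('for i, a in enumerate(...)') and its final
-- 'sorted(rank, key=rank.get)' (rank.get on a present key is its value: getD).
def merge_authors_alt (authors_1 : String) (authors_2 : String) : String :=
  let l1 := pvParse authors_1
  let l2 := pvParse authors_2
  let d1 := (PySem.List.enumerate l1 0).foldl (fun d p =>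
      let r := 2 * p.1
      if d.getD p.2 (r + 1) > r then d.insert p.2 r else d) PySem.Dict.empty
  let d2 := (PySem.List.enumerate l2 0).foldl (fun d p =>
      let r := 2 * p.1 + 1
      if d.getD p.2 (r + 1) > r then d.insert p.2 r else d) d1
  let merged := PySem.List.sorted d2.keys (fun a => d2.getD a 0)
  if merged.isEmpty then "" else PySem.Str.join ";" merged ++ ";"

-- ===== PRECONDITION & SPEC =====
def Spec_merge_authors (authors_1 : String) (authors_2 : String) (out : String) : Prop := out = merge_authors_alt authors_1 authors_2
instance (authors_1 : String) (authors_2 : String) (out : String) : Decidable (Spec_merge_authors authors_1 authors_2 out) := by unfold Spec_merge_authors; infer_instance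

-- ===== CLAIM (what is proved, stated in full; the proofs are below) =====
def Claim_equal_merge_authors : Prop := ∀ (authors_1 : String) (authors_2 : String), Dom_merge_authors authors_1 authors_2 → Spec_merge_authors authors_1 authors_2 (merge_authors authors_1 authors_2)

-- ===== LEMMAS AND PROOFS =====

-- the single-element dedup step A effectively performs
def pvStep (s : List String) (a : String) : List String :=
  if a != "" && !(PySem.Set.contains s a) then s ++ [a] else s

-- the interleaving of two lists (zip part, then the leftover tail)
def pvIlv : List String → List String → List String
  | [], ys => ys
  | xs, [] => xs
  | x :: xs, y :: ys => x :: y :: pvIlv xs ys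

-- the interleaving, each element decorated with its slot rank (2*i / 2*i+1 from offset i)
def pvRS : List String → List String → Int → List (String × Int)
  | [], [], _ => []
  | [], y :: ys, i => (y, 2 * i + 1) :: pvRS [] ys (i + 1)
  | x :: xs, [], i => (x, 2 * i) :: pvRS xs [] (i + 1)
  | x :: xs, y :: ys, i => (x, 2 * i) :: (y, 2 * i + 1) :: pvRS xs ys (i + 1)

-- rank of the FIRST occurrence of a in a decorated stream
def pvFv (S : List (String × Int)) (a : String) : Option Int :=
  (S.find? (fun p => p.1 == a)).map (·.2)

-- min of two optional ranks (none = absent)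
def pvOmin : Option Int → Option Int → Option Int
  | none, o => o
  | some v, none => some v
  | some v, some w => some (min v w)

theorem pvParse_ne_empty (s : String) : ∀ x ∈ pvParse s, x ≠ "" := by
  intro x hx
  simp only [pvParse, List.mem_map, List.mem_filter] at hx
  obtain ⟨a, ⟨_, ha⟩, rfl⟩ := hx
  simpa using ha

theorem pvMem_ilv (l1 l2 : List String) : ∀ x, x ∈ pvIlv l1 l2 ↔ x ∈ l1 ∨ x ∈ l2 := by
  induction l1 generalizing l2 with
  | nil => intro x; simp [pvIlv]
  | cons a l1 ih =>
    cases l2 with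
    | nil => intro x; simp [pvIlv]
    | cons b l2 =>
      intro x
      simp only [pvIlv, List.mem_cons, ih l2 x]
      tauto

theorem pvPairStep_diag (s : List String) (a : String) :
    (if a != "" && !(PySem.Set.contains s a) then (s ++ [a], PySem.Set.add s a)
     else ((s, s) : List String × PySem.Set String)) = (pvStep s a, pvStep s a) := by
  unfold pvStep
  by_cases hmem : a ∈ s
  · simp [hmem]
  · have hc : PySem.Set.contains s a = false := by
      by_contra h
      exact hmem ((PySem.Set.contains_iff s a).mp (by simpa using h))
    by_cases ha : a = ""
    · simp [ha]
    · simp [ha, hmem]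

theorem pvDiag_foldl (L : List String) (s : List String) :
    L.foldl (fun (st : List String × PySem.Set String) a =>
        if a != "" && !(PySem.Set.contains st.2 a) then (st.1 ++ [a], PySem.Set.add st.2 a) else st)
      (s, s) = (L.foldl pvStep s, L.foldl pvStep s) := by
  induction L generalizing s with
  | nil => rfl
  | cons a L ih =>
    simp only [List.foldl_cons]
    rw [show (if a != "" && !(PySem.Set.contains (Prod.snd (s, s)) a) then
          ((s, s).1 ++ [a], PySem.Set.add (s, s).2 a) else ((s, s) : List String × PySem.Set String))
        = (pvStep s a, pvStep s a) from pvPairStep_diag s a]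
    exact ih (pvStep s a)

theorem pvFoldA (l1 l2 : List String) (s : List String) :
    (PySem.List.pyRange 0 ((max l1.length l2.length : Nat) : Int) 1).foldl (pvBodyA l1 l2) (s, s)
      = ((pvIlv l1 l2).foldl pvStep s, (pvIlv l1 l2).foldl pvStep s) := by
  induction l1 generalizing l2 s with
  | nil =>
    have hcg : ∀ (st : List String × PySem.Set String), ∀ i ∈ PySem.List.pyRange 0 ((l2.length : Nat) : Int) 1,
        pvBodyA [] l2 st i = (fun (st : List String × PySem.Set String) (a : String) =>
          if a != "" && !(PySem.Set.contains st.2 a) then (st.1 ++ [a], PySem.Set.add st.2 a) else st)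
          st (PySem.List.pyGetD l2 i "") := by
      intro st i hi
      rw [PySem.List.mem_pyRange_one] at hi
      obtain ⟨h0, hlt⟩ := hi
      have hn : ¬ (i < ((([] : List String)).length : Int)) := by
        simp only [List.length_nil, Nat.cast_zero]; omega
      simp only [pvBodyA]
      rw [if_neg hn, if_pos hlt]
    simp only [List.length_nil, Nat.zero_le, Nat.max_eq_right, pvIlv]
    rw [PySem.List.foldl_congr_mem _ _ _ _ hcg]
    exact (PySem.List.foldl_pyRange_zero_pyGetD' l2 ""
      (fun (st : List String × PySem.Set String) (a : String) =>
        if a != "" && !(PySem.Set.contains st.2 a) then (st.1 ++ [a], PySem.Set.add st.2 a) else st)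
      (s, s)).trans (pvDiag_foldl l2 s)
  | cons x l1 ih =>
    cases l2 with
    | nil =>
      have hcg : ∀ (st : List String × PySem.Set String), ∀ i ∈ PySem.List.pyRange 0 (((x :: l1).length : Nat) : Int) 1,
          pvBodyA (x :: l1) [] st i = (fun (st : List String × PySem.Set String) (a : String) =>
            if a != "" && !(PySem.Set.contains st.2 a) then (st.1 ++ [a], PySem.Set.add st.2 a) else st)
            st (PySem.List.pyGetD (x :: l1) i "") := by
        intro st i hi
        rw [PySem.List.mem_pyRange_one] at hi
        obtain ⟨h0, hlt⟩ := hi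
        have hn : ¬ (i < ((([] : List String)).length : Int)) := by
          simp only [List.length_nil, Nat.cast_zero]; omega
        simp only [pvBodyA]
        rw [if_pos hlt, if_neg hn]
      simp only [List.length_nil, Nat.max_eq_left (Nat.zero_le _), pvIlv]
      rw [PySem.List.foldl_congr_mem _ _ _ _ hcg]
      exact (PySem.List.foldl_pyRange_zero_pyGetD' (x :: l1) ""
        (fun (st : List String × PySem.Set String) (a : String) =>
          if a != "" && !(PySem.Set.contains st.2 a) then (st.1 ++ [a], PySem.Set.add st.2 a) else st)
        (s, s)).trans (pvDiag_foldl (x :: l1) s)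
    | cons y l2 =>
      have hmax : (max (x :: l1).length (y :: l2).length : Nat)
          = (max l1.length l2.length : Nat) + 1 := by
        simp only [List.length_cons]; omega
      have hpos : (0 : Int) < (((max l1.length l2.length : Nat) + 1 : Nat) : Int) := by
        push_cast; omega
      rw [hmax, PySem.List.pyRange_one_cons hpos, List.foldl_cons]
      have h0 : pvBodyA (x :: l1) (y :: l2) (s, s) 0
          = (pvStep (pvStep s x) y, pvStep (pvStep s x) y) := by
        have hp1 : (0 : Int) < (((x :: l1).length : Nat) : Int) := by
          simp only [List.length_cons]; push_cast; omega
        have hp2 : (0 : Int) < (((y :: l2).length : Nat) : Int) := by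
          simp only [List.length_cons]; push_cast; omega
        simp only [pvBodyA, PySem.List.pyGetD_zero_cons]
        rw [if_pos hp1, if_pos hp2, pvPairStep_diag]
        exact pvPairStep_diag (pvStep s x) y
      rw [h0]
      have hsh : PySem.List.pyRange (0 + 1) (((max l1.length l2.length : Nat) + 1 : Nat) : Int) 1
          = (List.range (max l1.length l2.length)).map (fun (k : Nat) => (1 : Int) + (k : Int)) := by
        rw [PySem.List.pyRange_one]
        have ht : ((((max l1.length l2.length : Nat) + 1 : Nat) : Int) - (0 + 1)).toNat
            = max l1.length l2.length := by push_cast; omega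
        rw [ht]
        norm_num
      rw [hsh, List.foldl_map]
      have hbody : ∀ (st : List String × PySem.Set String) (k : Nat),
          pvBodyA (x :: l1) (y :: l2) st ((1 : Int) + k) = pvBodyA l1 l2 st (k : Int) := by
        intro st k
        have hc1 : ((1 : Int) + k < ((x :: l1).length : Int)) ↔ ((k : Int) < (l1.length : Int)) := by
          simp only [List.length_cons]; push_cast; omega
        have hc2 : ((1 : Int) + k < ((y :: l2).length : Int)) ↔ ((k : Int) < (l2.length : Int)) := by
          simp only [List.length_cons]; push_cast; omega
        have hg1 : PySem.List.pyGetD (x :: l1) ((1 : Int) + k) "" = PySem.List.pyGetD l1 (k : Int) "" := by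
          rw [show ((1 : Int) + k) = ((1 + k : Nat) : Int) by push_cast; ring]
          rw [PySem.List.pyGetD_natCast, PySem.List.pyGetD_natCast]
          simp [Nat.add_comm 1 k]
        have hg2 : PySem.List.pyGetD (y :: l2) ((1 : Int) + k) "" = PySem.List.pyGetD l2 (k : Int) "" := by
          rw [show ((1 : Int) + k) = ((1 + k : Nat) : Int) by push_cast; ring]
          rw [PySem.List.pyGetD_natCast, PySem.List.pyGetD_natCast]
          simp [Nat.add_comm 1 k]
        simp only [pvBodyA, hc1, hc2, hg1, hg2]
      rw [PySem.List.foldl_congr_mem (List.range (max l1.length l2.length)) _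
          (fun (st : List String × PySem.Set String) (k : Nat) => pvBodyA l1 l2 st (k : Int))
          _ (by intro st k _; exact hbody st k)]
      have hih := ih l2 (pvStep (pvStep s x) y)
      rw [PySem.List.pyRange_one, List.foldl_map] at hih
      simp only [sub_zero, Int.toNat_natCast, zero_add] at hih
      simp only [pvIlv, List.foldl_cons]
      exact hih

theorem pvDedup_eq_fold (L : List String) (h : ∀ x ∈ L, x ≠ "") :
    PySem.List.dedup L = L.foldl pvStep [] := by
  rw [PySem.List.dedup_eq_ofList, PySem.Set.ofList_eq_foldl]
  apply PySem.List.foldl_congr_mem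
  intro t x hx
  have hne : x ≠ "" := h x hx
  rw [pvStep, PySem.Set.add_eq_ite]
  by_cases hm : x ∈ t
  · simp [hm]
  · have hc : PySem.Set.contains t x = false := by
      by_contra hcc
      exact hm ((PySem.Set.contains_iff t x).mp (by simpa using hcc))
    simp [hm, hne]

-- ---------- B-side lemmas ----------

theorem pvOmin_some_left (v : Int) (o : Option Int) (h : ∀ w, o = some w → v ≤ w) :
    pvOmin (some v) o = some v := by
  cases o with
  | none => rfl
  | some w => simp [pvOmin, min_eq_left (h w rfl)]

theorem pvRS_map_fst (l1 l2 : List String) (i : Int) :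
    (pvRS l1 l2 i).map (·.1) = pvIlv l1 l2 := by
  induction l1 generalizing l2 i with
  | nil =>
    induction l2 generalizing i with
    | nil => simp [pvRS, pvIlv]
    | cons y ys ih => simp [pvRS, pvIlv, ih]
  | cons x xs ih =>
    cases l2 with
    | nil =>
      have h := ih [] (i + 1)
      cases xs with
      | nil => simp [pvRS, pvIlv]
      | cons a as =>
        simp only [pvRS, pvIlv, List.map_cons] at h ⊢
        simpa [pvIlv] using h
    | cons y ys => simp [pvRS, pvIlv, ih ys (i+1)]

theorem pvRS_snd_lb (l1 l2 : List String) (i : Int) :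
    ∀ p ∈ pvRS l1 l2 i, 2 * i ≤ p.2 := by
  induction l1 generalizing l2 i with
  | nil =>
    induction l2 generalizing i with
    | nil => intro p hp; simp [pvRS] at hp
    | cons y ys ih =>
      intro p hp
      simp only [pvRS, List.mem_cons] at hp
      rcases hp with rfl | hp
      · omega
      · have := ih (i+1) p hp; omega
  | cons x xs ih =>
    cases l2 with
    | nil =>
      intro p hp
      simp only [pvRS, List.mem_cons] at hp
      rcases hp with rfl | hp
      · omega
      · have := ih [] (i+1) p hp; omega
    | cons y ys =>
      intro p hp
      simp only [pvRS, List.mem_cons] at hp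
      rcases hp with rfl | rfl | hp
      · omega
      · omega
      · have := ih ys (i+1) p hp; omega

theorem pvRS_pairwise (l1 l2 : List String) (i : Int) :
    (pvRS l1 l2 i).Pairwise (fun p q => p.2 < q.2) := by
  induction l1 generalizing l2 i with
  | nil =>
    induction l2 generalizing i with
    | nil => simp [pvRS]
    | cons y ys ih =>
      simp only [pvRS]
      refine List.Pairwise.cons ?_ (ih (i+1))
      intro q hq
      have := pvRS_snd_lb [] ys (i+1) q hq; simp; omega
  | cons x xs ih =>
    cases l2 with
    | nil =>
      simp only [pvRS]
      refine List.Pairwise.cons ?_ (ih [] (i+1))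
      intro q hq
      have := pvRS_snd_lb xs [] (i+1) q hq; simp; omega
    | cons y ys =>
      simp only [pvRS]
      refine List.Pairwise.cons ?_ (List.Pairwise.cons ?_ (ih ys (i+1)))
      · intro q hq
        simp only [List.mem_cons] at hq
        rcases hq with rfl | hq
        · simp
        · have := pvRS_snd_lb xs ys (i+1) q hq; simp; omega
      · intro q hq
        have := pvRS_snd_lb xs ys (i+1) q hq; simp; omega

theorem pvIndexNil (a : String) : PySem.List.index? ([] : List String) a = none := by
  simp [PySem.List.index?_eq_idxOf?]

theorem pvOmin_some_right (v : Int) (o : Option Int) (h : ∀ w, o = some w → v ≤ w) :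
    pvOmin o (some v) = some v := by
  cases o with
  | none => rfl
  | some w => simp [pvOmin, min_eq_right (h w rfl)]

theorem pvMapIdx_lb (l : List String) (a : String) (f : Nat → Int) (c : Int)
    (hf : ∀ j : Nat, c ≤ f j) :
    ∀ w, (PySem.List.index? l a).map f = some w → c ≤ w := by
  intro w hw
  rcases Option.map_eq_some_iff.mp hw with ⟨j, _, rfl⟩
  exact hf j

theorem pvNodupKeys {β : Type} (L : List β) (f : PySem.Dict String Int → β → PySem.Dict String Int)
    (hf : ∀ d p, d.keys.Nodup → (f d p).keys.Nodup)
    (d : PySem.Dict String Int) (hd : d.keys.Nodup) : (L.foldl f d).keys.Nodup := by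
  induction L generalizing d with
  | nil => exact hd
  | cons p L ih => exact ih (f d p) (hf d p hd)

theorem pvFv_RS (l1 l2 : List String) (i : Int) (a : String) :
    pvFv (pvRS l1 l2 i) a
      = pvOmin ((PySem.List.index? l1 a).map (fun j : Nat => 2 * (i + (j : Int))))
               ((PySem.List.index? l2 a).map (fun j : Nat => 2 * (i + (j : Int)) + 1)) := by
  induction l1 generalizing l2 i with
  | nil =>
    induction l2 generalizing i with
    | nil => simp [pvRS, pvFv, pvOmin]
    | cons y ys ih =>
      rw [pvIndexNil]
      by_cases hay : y = a
      · subst hay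
        rw [PySem.List.index?_cons_self]
        simp only [pvRS, pvFv, List.find?_cons, beq_self_eq_true, Option.map_some]
        show some (2 * i + 1) = pvOmin none (some (2 * (i + ((0 : Nat) : Int)) + 1))
        simp [pvOmin]
      · have hne : (y == a) = false := by simp [hay]
        rw [PySem.List.index?_cons_of_ne ys hay]
        have h := ih (i + 1)
        rw [pvIndexNil] at h
        simp only [pvFv] at h
        simp only [pvRS, pvFv, List.find?_cons, hne, h, Option.map_none, Option.map_map]
        show pvOmin none _ = pvOmin none _
        congr 1
        congr 1
        funext j
        show 2 * ((i + 1) + (j : Int)) + 1 = 2 * (i + ((j + 1 : Nat) : Int)) + 1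
        push_cast; ring
  | cons x xs ih =>
    cases l2 with
    | nil =>
      rw [pvIndexNil]
      by_cases hax : x = a
      · subst hax
        rw [PySem.List.index?_cons_self]
        simp only [pvRS, pvFv, List.find?_cons, beq_self_eq_true, Option.map_some]
        show some (2 * i) = pvOmin (some (2 * (i + ((0 : Nat) : Int)))) none
        simp [pvOmin]
      · have hne : (x == a) = false := by simp [hax]
        rw [PySem.List.index?_cons_of_ne xs hax]
        have h := ih [] (i + 1)
        rw [pvIndexNil] at h
        simp only [pvFv] at h
        simp only [pvRS, pvFv, List.find?_cons, hne, h, Option.map_none, Option.map_map]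
        congr 2
        funext j
        show 2 * ((i + 1) + (j : Int)) = 2 * (i + ((j + 1 : Nat) : Int))
        push_cast; ring
    | cons y ys =>
      by_cases hax : x = a
      · subst hax
        rw [PySem.List.index?_cons_self]
        simp only [pvRS, pvFv, List.find?_cons, beq_self_eq_true, Option.map_some]
        show some (2 * i) = pvOmin (some (2 * (i + ((0 : Nat) : Int)))) _
        rw [show (2 * (i + ((0 : Nat) : Int))) = 2 * i by push_cast; ring]
        rw [pvOmin_some_left]
        apply pvMapIdx_lb (c := 2 * i)
        intro j
        have : (0 : Int) ≤ (j : Int) := Int.natCast_nonneg j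
        omega
      · have hnex : (x == a) = false := by simp [hax]
        rw [PySem.List.index?_cons_of_ne xs hax]
        by_cases hay : y = a
        · subst hay
          rw [PySem.List.index?_cons_self]
          simp only [pvRS, pvFv, List.find?_cons, hnex, beq_self_eq_true, Option.map_some]
          show some (2 * i + 1) = pvOmin _ (some (2 * (i + ((0 : Nat) : Int)) + 1))
          rw [show (2 * (i + ((0 : Nat) : Int)) + 1) = 2 * i + 1 by push_cast; ring]
          rw [pvOmin_some_right]
          intro w hw
          rcases Option.map_eq_some_iff.mp hw with ⟨j, hj, rfl⟩
          rcases Option.map_eq_some_iff.mp hj with ⟨k, _, rfl⟩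
          have : (0 : Int) ≤ (k : Int) := Int.natCast_nonneg k
          push_cast; omega
        · have hney : (y == a) = false := by simp [hay]
          rw [PySem.List.index?_cons_of_ne ys hay]
          have h := ih ys (i + 1)
          simp only [pvFv] at h
          simp only [pvRS, pvFv, List.find?_cons, hnex, hney, h]
          rw [Option.map_map, Option.map_map]
          congr 1
          · congr 1
            funext j
            show 2 * ((i + 1) + (j : Int)) = 2 * (i + ((j + 1 : Nat) : Int))
            push_cast; ring
          · congr 1
            funext j
            show 2 * ((i + 1) + (j : Int)) + 1 = 2 * (i + ((j + 1 : Nat) : Int)) + 1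
            push_cast; ring

theorem pvPass1 (l : List String) (s : Int) (d : PySem.Dict String Int) (a : String) :
    ((PySem.List.enumerate l s).foldl (fun d p =>
        if d.getD p.2 (2 * p.1 + 1) > 2 * p.1 then d.insert p.2 (2 * p.1) else d) d).get? a
      = pvOmin (d.get? a) ((PySem.List.index? l a).map (fun j : Nat => 2 * (s + (j : Int)))) := by
  induction l generalizing s d with
  | nil =>
    rw [pvIndexNil]
    cases h : d.get? a <;> simp [PySem.List.enumerate, pvOmin, h]
  | cons x xs ih =>
    rw [PySem.List.enumerate_cons, List.foldl_cons]
    have hrec := ih (s + 1)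
    by_cases hax : x = a
    · subst hax
      rw [PySem.List.index?_cons_self, Option.map_some]
      show ((PySem.List.enumerate xs (s+1)).foldl
          (fun d p => let r := 2 * p.1; if d.getD p.2 (r + 1) > r then d.insert p.2 r else d)
          (if d.getD x (2 * s + 1) > 2 * s then d.insert x (2 * s) else d)).get? x
        = pvOmin (d.get? x) (some (2 * (s + ((0:Nat):Int))))
      rw [hrec, PySem.Dict.getD_eq_get?_getD]
      have hlb : ∀ w, (Option.map (fun j : Nat => 2 * ((s+1) + (j : Int))) (PySem.List.index? xs x)) = some w → 2 * s ≤ w := by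
        apply pvMapIdx_lb
        intro j
        have : (0:Int) ≤ (j:Int) := Int.natCast_nonneg j
        omega
      cases hd : d.get? x with
      | none =>
        simp only [Option.getD_none]
        rw [if_pos (by omega : (2 * s : Int) < 2 * s + 1), PySem.Dict.get?_insert_self,
          pvOmin_some_left _ _ hlb]
        show _ = pvOmin none _
        simp only [pvOmin]
        congr 1
        push_cast; ring
      | some v =>
        simp only [Option.getD_some]
        by_cases hv : (2 * s : Int) < v
        · rw [if_pos hv, PySem.Dict.get?_insert_self, pvOmin_some_left _ _ hlb]
          simp only [pvOmin, Option.some.injEq]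
          push_cast
          omega
        · rw [if_neg hv, hd, pvOmin_some_left]
          · simp only [pvOmin, Option.some.injEq]
            push_cast
            omega
          · intro w hw
            have := hlb w hw
            omega
    · rw [PySem.List.index?_cons_of_ne xs hax, Option.map_map]
      have hstep : ∀ d' : PySem.Dict String Int,
          (if d.getD x (2 * s + 1) > 2 * s then d.insert x (2 * s) else d).get? a = d.get? a := by
        intro _
        split
        · exact PySem.Dict.get?_insert_of_ne _ _ (fun h => hax h.symm)
        · rfl
      show ((PySem.List.enumerate xs (s+1)).foldl _
          (if d.getD x (2 * s + 1) > 2 * s then d.insert x (2 * s) else d)).get? a = _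
      rw [hrec, hstep d]
      congr 1
      congr 1
      funext j
      show (2 : Int) * ((s + 1) + (j : Int)) = 2 * (s + ((j + 1 : Nat) : Int))
      push_cast; ring

theorem pvPass2 (l : List String) (s : Int) (d : PySem.Dict String Int) (a : String) :
    ((PySem.List.enumerate l s).foldl (fun d p =>
        if d.getD p.2 (2 * p.1 + 1 + 1) > 2 * p.1 + 1 then d.insert p.2 (2 * p.1 + 1) else d) d).get? a
      = pvOmin (d.get? a) ((PySem.List.index? l a).map (fun j : Nat => 2 * (s + (j : Int)) + 1)) := by
  induction l generalizing s d with
  | nil =>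
    rw [pvIndexNil]
    cases h : d.get? a <;> simp [PySem.List.enumerate, pvOmin, h]
  | cons x xs ih =>
    rw [PySem.List.enumerate_cons, List.foldl_cons]
    have hrec := ih (s + 1)
    by_cases hax : x = a
    · subst hax
      rw [PySem.List.index?_cons_self, Option.map_some]
      show ((PySem.List.enumerate xs (s+1)).foldl
          (fun d p => let r := 2 * p.1 + 1; if d.getD p.2 (r + 1) > r then d.insert p.2 r else d)
          (if d.getD x (2 * s + 1 + 1) > 2 * s + 1 then d.insert x (2 * s + 1) else d)).get? x
        = pvOmin (d.get? x) (some (2 * (s + ((0:Nat):Int)) + 1))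
      rw [hrec, PySem.Dict.getD_eq_get?_getD]
      have hlb : ∀ w, (Option.map (fun j : Nat => 2 * ((s+1) + (j : Int)) + 1) (PySem.List.index? xs x)) = some w → 2 * s + 1 ≤ w := by
        apply pvMapIdx_lb
        intro j
        have : (0:Int) ≤ (j:Int) := Int.natCast_nonneg j
        omega
      cases hd : d.get? x with
      | none =>
        simp only [Option.getD_none]
        rw [if_pos (by omega : (2 * s + 1 : Int) < 2 * s + 1 + 1), PySem.Dict.get?_insert_self,
          pvOmin_some_left _ _ hlb]
        show _ = pvOmin none _
        simp only [pvOmin]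
        congr 1
        push_cast; ring
      | some v =>
        simp only [Option.getD_some]
        by_cases hv : (2 * s + 1 : Int) < v
        · rw [if_pos hv, PySem.Dict.get?_insert_self, pvOmin_some_left _ _ hlb]
          simp only [pvOmin, Option.some.injEq]
          push_cast
          omega
        · rw [if_neg hv, hd, pvOmin_some_left]
          · simp only [pvOmin, Option.some.injEq]
            push_cast
            omega
          · intro w hw
            have := hlb w hw
            omega
    · rw [PySem.List.index?_cons_of_ne xs hax, Option.map_map]
      have hstep : ∀ d' : PySem.Dict String Int,
          (if d.getD x (2 * s + 1 + 1) > 2 * s + 1 then d.insert x (2 * s + 1) else d).get? a = d.get? a := by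
        intro _
        split
        · exact PySem.Dict.get?_insert_of_ne _ _ (fun h => hax h.symm)
        · rfl
      show ((PySem.List.enumerate xs (s+1)).foldl _
          (if d.getD x (2 * s + 1 + 1) > 2 * s + 1 then d.insert x (2 * s + 1) else d)).get? a = _
      rw [hrec, hstep d]
      congr 1
      congr 1
      funext j
      show (2 : Int) * ((s + 1) + (j : Int)) + 1 = 2 * (s + ((j + 1 : Nat) : Int)) + 1
      push_cast; ring

theorem pvFv_mem (S : List (String × Int)) (a : String) (h : a ∈ S.map (·.1)) :
    ∃ v, pvFv S a = some v ∧ (a, v) ∈ S := by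
  induction S with
  | nil => simp at h
  | cons p T ih =>
    by_cases hpa : p.1 = a
    · refine ⟨p.2, ?_, ?_⟩
      · simp [pvFv, hpa]
      · simp only [List.mem_cons]
        left
        cases p; simp_all
    · have h' : a ∈ T.map (·.1) := by
        simp only [List.map_cons, List.mem_cons] at h
        tauto
      obtain ⟨v, hv, hm⟩ := ih h'
      refine ⟨v, ?_, List.mem_cons_of_mem _ hm⟩
      have : (p.1 == a) = false := by simp [hpa]
      simp [pvFv, this]
      simpa [pvFv] using hv

theorem pvDedupPairwiseFv (S : List (String × Int)) (h : S.Pairwise (fun p q => p.2 < q.2)) :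
    (PySem.List.dedup (S.map (·.1))).Pairwise
      (fun a b => (pvFv S a).getD 0 < (pvFv S b).getD 0) := by
  induction S with
  | nil => simp [PySem.List.dedup_eq_ofList, PySem.Set.ofList_nil]
  | cons p T ih =>
    obtain ⟨hp, hT⟩ := List.pairwise_cons.mp h
    rw [List.map_cons, PySem.List.dedup_eq_ofList, PySem.Set.ofList_cons]
    have hdis : (PySem.Set.ofList (T.map (·.1))).discard p.1
        = (PySem.Set.ofList (T.map (·.1))).filter (fun y => !(y == p.1)) := rfl
    refine List.Pairwise.cons ?_ ?_
    · intro b hb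
      rw [hdis, List.mem_filter] at hb
      obtain ⟨hbmem, hbne⟩ := hb
      have hbne' : b ≠ p.1 := by simpa using hbne
      have hbT : b ∈ T.map (·.1) := (PySem.Set.mem_ofList _ _).mp hbmem
      obtain ⟨v, hv, hm⟩ := pvFv_mem T b hbT
      have hfp : pvFv (p :: T) p.1 = some p.2 := by
        simp [pvFv]
      have hfb : pvFv (p :: T) b = some v := by
        have : (p.1 == b) = false := by simp [(Ne.symm hbne' : ¬ p.1 = b)]
        simp only [pvFv, List.find?_cons, this]
        simpa [pvFv] using hv
      rw [hfp, hfb]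
      simpa using hp (b, v) hm
    · have ihp := ih hT
      rw [PySem.List.dedup_eq_ofList] at ihp
      have hsub : ((PySem.Set.ofList (T.map (·.1))).filter (fun y => !(y == p.1))).Sublist
          (PySem.Set.ofList (T.map (·.1))) := List.filter_sublist
      rw [hdis]
      refine List.Pairwise.imp_of_mem ?_ (List.Pairwise.sublist hsub ihp)
      intro a b ha hb hab
      rw [List.mem_filter] at ha hb
      have hane : (p.1 == a) = false := by
        have h2 : a ≠ p.1 := by simpa using ha.2
        simp [(Ne.symm h2 : ¬ p.1 = a)]
      have hbne : (p.1 == b) = false := by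
        have h2 : b ≠ p.1 := by simpa using hb.2
        simp [(Ne.symm h2 : ¬ p.1 = b)]
      have e1 : pvFv (p :: T) a = pvFv T a := by simp [pvFv, hane]
      have e2 : pvFv (p :: T) b = pvFv T b := by simp [pvFv, hbne]
      rw [e1, e2]
      exact hab

-- ===== VERDICT (by name: the statement is the Claim_ definition above) =====
theorem merge_authors_spec : Claim_equal_merge_authors := by
  intro a1 a2 _
  unfold Spec_merge_authors
  simp only [merge_authors, merge_authors_alt]
  have hne : ∀ x ∈ pvIlv (pvParse a1) (pvParse a2), x ≠ "" := by
    intro x hx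
    rcases (pvMem_ilv _ _ x).mp hx with h | h
    · exact pvParse_ne_empty a1 x h
    · exact pvParse_ne_empty a2 x h
  rw [show (([], PySem.Set.empty) : List String × PySem.Set String)
      = (([] : List String), ([] : List String)) from rfl]
  rw [pvFoldA]
  set l1 := pvParse a1 with hl1
  set l2 := pvParse a2 with hl2
  set D2 := (List.foldl
      (fun d p => if d.getD p.2 (2 * p.1 + 1 + 1) > 2 * p.1 + 1 then d.insert p.2 (2 * p.1 + 1) else d)
      (List.foldl (fun d p => if d.getD p.2 (2 * p.1 + 1) > 2 * p.1 then d.insert p.2 (2 * p.1) else d)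
        PySem.Dict.empty (PySem.List.enumerate l1 0))
      (PySem.List.enumerate l2 0)) with hD2
  have hget : ∀ a, D2.get? a = pvFv (pvRS l1 l2 0) a := by
    intro a
    rw [hD2, pvPass2, pvPass1, PySem.Dict.get?_empty, pvFv_RS]
    rfl
  have hnodup : D2.keys.Nodup := by
    rw [hD2]
    apply pvNodupKeys
    · intro d p hd
      dsimp only
      split
      · exact PySem.Dict.nodup_keys_insert _ _ _ hd
      · exact hd
    · apply pvNodupKeys
      · intro d p hd
        dsimp only
        split
        · exact PySem.Dict.nodup_keys_insert _ _ _ hd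
        · exact hd
      · exact PySem.Dict.nodup_keys_empty
  have hfvnone : ∀ a, pvFv (pvRS l1 l2 0) a = none ↔ a ∉ pvIlv l1 l2 := by
    intro a
    rw [← pvRS_map_fst l1 l2 0]
    unfold pvFv
    rw [Option.map_eq_none_iff, List.find?_eq_none]
    constructor
    · intro h hmem
      rcases List.mem_map.mp hmem with ⟨p, hp, rfl⟩
      exact (by simpa using h p hp : p.1 ≠ p.1) rfl
    · intro h p hp
      simp only [beq_iff_eq]
      intro heq
      exact absurd (List.mem_map.mpr ⟨p, hp, heq⟩) h
  have hperm : (PySem.List.dedup (pvIlv l1 l2)).Perm D2.keys := by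
    rw [List.perm_ext_iff_of_nodup (PySem.List.nodup_dedup _) hnodup]
    intro a
    rw [PySem.List.mem_dedup]
    constructor
    · intro h
      by_contra hk
      have h0 : D2.get? a = none := (PySem.Dict.get?_eq_none_iff_not_mem_keys _ _).mpr hk
      rw [hget a] at h0
      exact ((hfvnone a).mp h0) h
    · intro h
      by_contra hmem
      have h0 : D2.get? a = none := by rw [hget a]; exact (hfvnone a).mpr hmem
      exact ((PySem.Dict.get?_eq_none_iff_not_mem_keys _ _).mp h0) h
  have hpair : (PySem.List.dedup (pvIlv l1 l2)).Pairwise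
      (fun a b => D2.getD a 0 < D2.getD b 0) := by
    have h := pvDedupPairwiseFv (pvRS l1 l2 0) (pvRS_pairwise l1 l2 0)
    rw [pvRS_map_fst] at h
    refine h.imp ?_
    intro a b hlt
    rw [PySem.Dict.getD_eq_get?_getD, PySem.Dict.getD_eq_get?_getD, hget, hget]
    exact hlt
  have hsorted : PySem.List.sorted D2.keys (fun a => D2.getD a 0)
      = PySem.List.dedup (pvIlv l1 l2) :=
    PySem.List.sorted_eq_of_perm_of_pairwise_lt _ _ _ hperm hpair
  rw [hsorted, show (pvIlv l1 l2).foldl pvStep [] = PySem.List.dedup (pvIlv l1 l2) from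
    (pvDedup_eq_fold _ hne).symm]
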